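-- pv_equiv track=rewrite | github.com/hyeonggwon/algorithm | python/sort/backjoon17140.py | oper
-- ===== SOURCE A (Python) =====
-- from collections import Counter
--
-- def oper(arr):
--     new_arr = []
--     max_len = 0
--
--     for row in arr:
--         counter = Counter(x for x in row if x)
--
--         pairs = sorted(counter.items(), key=lambda x: (x[1], x[0]))
--
--         new_row = []
--         for pair in pairs:
--             new_row.extend(pair)
--
--         new_row = new_row[:100]
--         max_len = max(max_len, len(new_row))
--
--         new_arr.append(new_row)
--
--     for row in new_arr:
--         while len(row) < max_len:
--             row.append(0)
--
--     return new_arr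
-- ===== SOURCE B (Python) =====
-- def oper(arr):
--     rows = []
--     for row in arr:
--         vals = sorted(x for x in row if x)
--         # run-length encode the sorted values: counting by sort+group instead of hashing
--         pairs = []
--         i = 0
--         while i < len(vals):
--             j = i
--             while j < len(vals) and vals[j] == vals[i]:
--                 j += 1
--             pairs.append((vals[i], j - i))
--             i = j
--         pairs.sort(key=lambda p: (p[1], p[0]))
--         flat = [x for p in pairs for x in p]
--         rows.append(flat[:100])
--     max_len = max((len(r) for r in rows), default=0)
--     return [r + [0] * (max_len - len(r)) for r in rows]
-- ===== Notes on version B (the rewrite author's own statement) =====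
-- stated objective: alternative
-- what changed: Replaces Counter's hash-counting with sort-then-run-length-encode counting per row, builds each compressed row by flattening a list comprehension, and pads rows arithmetically with a computed max over lengths instead of A's running max plus while-append loop.
import Mathlib
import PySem

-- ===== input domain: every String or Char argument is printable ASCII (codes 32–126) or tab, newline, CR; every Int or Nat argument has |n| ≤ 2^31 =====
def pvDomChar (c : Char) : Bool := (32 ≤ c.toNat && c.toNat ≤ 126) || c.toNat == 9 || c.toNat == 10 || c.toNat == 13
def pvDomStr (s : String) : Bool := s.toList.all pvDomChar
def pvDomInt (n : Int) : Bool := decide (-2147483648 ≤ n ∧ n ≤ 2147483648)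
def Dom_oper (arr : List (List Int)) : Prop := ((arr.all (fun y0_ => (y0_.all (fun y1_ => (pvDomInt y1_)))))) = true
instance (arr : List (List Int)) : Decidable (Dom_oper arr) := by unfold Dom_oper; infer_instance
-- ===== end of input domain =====

-- B replaces Counter's hash-counting with sort-then-run-length-encode counting per row and pads rows arithmetically; same cost, alternative algorithm (A mutates its fresh rows only, the input is untouched).


-- ===== PORT A =====
-- 'while len(row) < max_len: row.append(0)' — A's final padding loop
def operPadA (row : List Int) (m : Int) : List Int :=
  if h : PySem.List.len row < m then operPadA (row ++ [0]) m else row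
termination_by (m - PySem.List.len row).toNat
decreasing_by simp [PySem.List.len] at *; omega

def oper (arr : List (List Int)) : List (List Int) :=
  let st := arr.foldl (fun (s : List (List Int) × Int) row =>
    let counter := PySem.Dict.counter (row.filter (fun x => !(x == 0)))
    let pairs := PySem.List.sorted2 counter.items (fun p => p.2) (fun p => p.1)
    let newRow := pairs.foldl (fun acc (p : Int × Int) => acc ++ [p.1, p.2]) []
    let newRow := PySem.List.slice newRow none (some 100)
    (s.1 ++ [newRow], max s.2 (PySem.List.len newRow))) ([], 0)
  st.1.map (fun row => operPadA row st.2)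

-- ===== PORT B =====
-- B's inner while loops: scan the run of vals[i], emit (value, run length)
def operRle (vals : List Int) : List (Int × Int) :=
  match vals with
  | [] => []
  | v :: t =>
      (v, 1 + PySem.List.len (t.takeWhile (fun x => x == v))) ::
        operRle (t.dropWhile (fun x => x == v))
termination_by vals.length
decreasing_by simp; have := List.length_dropWhile_le (l := t) (fun x => x == v); omega

def operRowB (row : List Int) : List Int :=
  let vals := PySem.List.sorted (row.filter (fun x => !(x == 0))) (fun x => x) false
  let pairs := PySem.List.sorted2 (operRle vals) (fun p => p.2) (fun p => p.1)
  PySem.List.slice (pairs.flatMap (fun p => [p.1, p.2])) none (some 100)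

def oper_alt (arr : List (List Int)) : List (List Int) :=
  let rows := arr.map operRowB
  let maxLen := PySem.List.maxD (rows.map PySem.List.len) (fun x => x) 0
  rows.map (fun r => r ++ List.replicate ((maxLen - PySem.List.len r).toNat) 0)

-- ===== PRECONDITION & SPEC =====
def Spec_oper (arr : List (List Int)) (out : List (List Int)) : Prop := out = oper_alt arr
instance (arr : List (List Int)) (out : List (List Int)) : Decidable (Spec_oper arr out) := by unfold Spec_oper; infer_instance

-- ===== CLAIM (what is proved, stated in full; the proofs are below) =====
def Claim_equal_oper : Prop := ∀ (arr : List (List Int)), Dom_oper arr → Spec_oper arr (oper arr)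

-- ===== LEMMAS AND PROOFS =====
-- the Boolean 'before' relation sorted2 uses for the key lambda x: (x[1], x[0])
def bfLex (a b : Int × Int) : Bool :=
  decide (a.2 < b.2) || (!decide (b.2 < a.2) && decide (a.1 < b.1))

lemma sorted2_eq_foldl (xs : List (Int × Int)) :
    PySem.List.sorted2 xs (fun p => p.2) (fun p => p.1) false
      = xs.foldl (fun acc x => PySem.List.insertBy bfLex x acc) [] := rfl

lemma ins_perm {α : Type} (bf : α → α → Bool) (x : α) (acc : List α) :
    (PySem.List.insertBy bf x acc).Perm (x :: acc) := by
  induction acc with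
  | nil => simp [PySem.List.insertBy]
  | cons y t ih =>
      simp only [PySem.List.insertBy]
      split
      · exact List.Perm.refl _
      · exact (ih.cons y).trans (List.Perm.swap x y t)

lemma bfLex_asym {a b : Int × Int} (h : bfLex a b = true) : bfLex b a = false := by
  simp [bfLex] at *; omega

lemma bfLex_total {a b : Int × Int} (h1 : bfLex a b = false) (h2 : bfLex b a = false) : a = b := by
  simp [bfLex] at *
  obtain ⟨a1,a2⟩ := a; obtain ⟨b1,b2⟩ := b
  simp_all; omega

lemma bfLex_trans {a b c : Int × Int} (h1 : bfLex a b = true) (h2 : bfLex c b = false) :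
    bfLex c a = false := by
  simp [bfLex] at *; omega

lemma ins_pairwise (x : Int × Int) (acc : List (Int × Int))
    (h : acc.Pairwise (fun a b => bfLex b a = false)) :
    (PySem.List.insertBy bfLex x acc).Pairwise (fun a b => bfLex b a = false) := by
  induction acc with
  | nil => simp [PySem.List.insertBy]
  | cons y t ih =>
      cases h with
      | cons hy ht =>
        simp only [PySem.List.insertBy]
        split
        · rename_i hlt
          refine List.Pairwise.cons ?_ (List.Pairwise.cons hy ht)
          intro z hz
          rcases List.mem_cons.mp hz with rfl | hz'
          · exact bfLex_asym hlt
          · exact bfLex_trans hlt (hy z hz')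
        · rename_i hlt
          refine List.Pairwise.cons ?_ (ih ht)
          intro z hz
          have hm := (ins_perm bfLex x t).mem_iff.mp hz
          rcases List.mem_cons.mp hm with rfl | hz'
          · simpa using hlt
          · exact hy z hz'

lemma foldl_ins_pairwise (xs acc : List (Int × Int))
    (h : acc.Pairwise (fun a b => bfLex b a = false)) :
    (xs.foldl (fun acc x => PySem.List.insertBy bfLex x acc) acc).Pairwise
      (fun a b => bfLex b a = false) := by
  induction xs generalizing acc with
  | nil => simpa
  | cons x t ih => exact ih _ (ins_pairwise x acc h)

lemma sorted2_pairwise (xs : List (Int × Int)) :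
    (PySem.List.sorted2 xs (fun p => p.2) (fun p => p.1) false).Pairwise
      (fun a b => bfLex b a = false) := by
  rw [sorted2_eq_foldl]
  exact foldl_ins_pairwise xs [] (by simp)

lemma sorted2_perm_eq {xs ys : List (Int × Int)} (h : xs.Perm ys) :
    PySem.List.sorted2 xs (fun p => p.2) (fun p => p.1) false
      = PySem.List.sorted2 ys (fun p => p.2) (fun p => p.1) false := by
  refine List.Perm.eq_of_pairwise ?_ (sorted2_pairwise xs) (sorted2_pairwise ys) ?_
  · intro a b _ _ h1 h2; exact (bfLex_total h2 h1)
  · exact (PySem.List.sorted2_perm xs _ _ _).trans (h.trans (PySem.List.sorted2_perm ys _ _ _).symm)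

lemma dropWhile_gt (v : Int) (s : List Int) (hpw : s.Pairwise (· ≤ ·)) (hge : ∀ x ∈ s, v ≤ x) :
    ∀ x ∈ s.dropWhile (fun x => x == v), v < x := by
  induction s with
  | nil => simp
  | cons a r ih =>
      cases hpw with
      | cons ha hr =>
        by_cases hav : a = v
        · subst hav
          simp only [List.dropWhile_cons, BEq.rfl]
          exact ih hr (fun x hx => hge x (List.mem_cons_of_mem a hx))
        · have : (a == v) = false := by simp [hav]
          simp only [List.dropWhile_cons, this]
          intro x hx
          have hva : v < a := lt_of_le_of_ne (hge a (List.mem_cons_self)) (fun h => hav h.symm)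
          rcases List.mem_cons.mp hx with rfl | hx'
          · exact hva
          · exact lt_of_lt_of_le hva (ha x hx')

lemma rle_spec (l : List Int) (h : l.Pairwise (· ≤ ·)) :
    (∀ p : Int × Int, p ∈ operRle l ↔ p.1 ∈ l ∧ p.2 = (l.count p.1 : Int)) ∧
    (operRle l).Pairwise (fun a b => a.1 < b.1) := by
  induction l using operRle.induct with
  | case1 => simp [operRle]
  | case2 v t ih =>
      cases h with
      | cons hv ht =>
        set tw := t.takeWhile (fun x => x == v) with htw
        set dw := t.dropWhile (fun x => x == v) with hdw
        have hsplit : tw ++ dw = t := List.takeWhile_append_dropWhile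
        have tw_all : ∀ x ∈ tw, x = v := by
          intro x hx
          have := List.mem_takeWhile_imp hx
          simpa using this
        have dw_pw : dw.Pairwise (· ≤ ·) := ht.sublist (List.dropWhile_sublist _)
        have dw_gt : ∀ x ∈ dw, v < x := dropWhile_gt v t ht hv
        have v_not_dw : v ∉ dw := fun hm => lt_irrefl v (dw_gt v hm)
        have hcv : (v :: t).count v = 1 + tw.length := by
          rw [← hsplit, List.count_cons_self, List.count_append]
          have h1 : tw.count v = tw.length := List.count_eq_length.mpr (fun b hb => (tw_all b hb).symm)
          have h2 : dw.count v = 0 := List.count_eq_zero.mpr v_not_dw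
          omega
        have hca : ∀ a : Int, a ≠ v → (v :: t).count a = dw.count a := by
          intro a hav
          have h1 : tw.count a = 0 := List.count_eq_zero.mpr (fun hm => hav (tw_all a hm))
          rw [← hsplit]
          simp [List.count_append, h1, Ne.symm hav]
        obtain ⟨ihm, ihpw⟩ := ih dw_pw
        constructor
        · intro p
          rw [operRle]
          simp only [List.mem_cons]
          constructor
          · rintro (rfl | hp)
            · refine ⟨Or.inl rfl, ?_⟩
              simp only [hcv, PySem.List.len_eq]
              push_cast; ring
            · obtain ⟨hp1, hp2⟩ := ihm p |>.mp hp
              have hne : p.1 ≠ v := fun he => lt_irrefl v (he ▸ dw_gt p.1 hp1)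
              refine ⟨?_, ?_⟩
              · exact Or.inr (hsplit ▸ List.mem_append_right tw hp1)
              · rw [hca p.1 hne]; exact hp2
          · rintro ⟨hp1, hp2⟩
            by_cases hpv : p.1 = v
            · left
              obtain ⟨a, b⟩ := p
              simp only at hpv hp2
              subst hpv
              rw [hcv] at hp2
              simp only [PySem.List.len_eq, Prod.mk.injEq, true_and]
              rw [← htw]
              push_cast at hp2 ⊢
              omega
            · right
              have hp1' : p.1 ∈ dw := by
                rcases hp1 with he | hmt
                · exact absurd he hpv
                · rcases List.mem_append.mp (hsplit ▸ hmt : p.1 ∈ tw ++ dw) with hm | hm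
                  · exact absurd (tw_all _ hm) hpv
                  · exact hm
              exact (ihm p).mpr ⟨hp1', by rw [hca p.1 hpv] at hp2; exact hp2⟩
        · rw [operRle]
          refine List.Pairwise.cons ?_ ihpw
          intro q hq
          have := (ihm q).mp hq
          exact dw_gt q.1 this.1

lemma rle_perm_items (fr : List Int) :
    (operRle (PySem.List.sorted fr (fun x => x) false)).Perm
      ((PySem.Set.ofList fr).map (fun k => (k, (fr.count k : Int)))) := by
  have hs : (PySem.List.sorted fr (fun x => x) false).Pairwise (· ≤ ·) :=
    PySem.List.sorted_pairwise fr (fun x => x)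
  obtain ⟨hm, hpw⟩ := rle_spec _ hs
  have hperm := PySem.List.sorted_perm fr (fun x => x) false
  have hnd1 : (operRle (PySem.List.sorted fr (fun x => x) false)).Nodup :=
    hpw.imp (fun h he => by subst he; exact lt_irrefl _ h)
  have hnd2 : ((PySem.Set.ofList fr).map (fun k => (k, (fr.count k : Int)))).Nodup :=
    (PySem.Set.nodup_ofList fr).map (fun a b h => congrArg Prod.fst h)
  rw [List.perm_ext_iff_of_nodup hnd1 hnd2]
  intro p
  rw [hm p, List.mem_map]
  constructor
  · rintro ⟨h1, h2⟩
    refine ⟨p.1, ?_, ?_⟩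
    · rw [PySem.Set.mem_ofList]
      exact hperm.mem_iff.mp h1
    · have : (PySem.List.sorted fr (fun x => x) false).count p.1 = fr.count p.1 :=
        hperm.count_eq p.1
      rw [← this, ← h2]
  · rintro ⟨k, hk, rfl⟩
    have hk' : k ∈ fr := (PySem.Set.mem_ofList fr k).mp hk
    refine ⟨hperm.mem_iff.mpr hk', ?_⟩
    simp [hperm.count_eq]

def pvRowA (row : List Int) : List Int :=
  PySem.List.slice
    ((PySem.List.sorted2 (PySem.Dict.counter (row.filter (fun x => !(x == 0)))).items
        (fun p => p.2) (fun p => p.1)).foldl (fun acc (p : Int × Int) => acc ++ [p.1, p.2]) [])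
    none (some 100)

lemma row_eq (row : List Int) : pvRowA row = operRowB row := by
  unfold pvRowA operRowB
  rw [PySem.Dict.items_counter]
  rw [sorted2_perm_eq (rle_perm_items (row.filter (fun x => !(x == 0)))).symm]
  rw [PySem.List.foldl_append_eq_flatMap]
  rfl

lemma maxD_nonneg_eq (l : List Int) (h : ∀ x ∈ l, 0 ≤ x) :
    PySem.List.maxD l (fun x => x) 0 = l.foldl max 0 := by
  cases l with
  | nil => rfl
  | cons x t =>
      rw [PySem.List.maxD, PySem.List.max?_id_cons]
      simp only [Option.getD_some, List.foldl_cons]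
      have : max 0 x = x := max_eq_right (h x List.mem_cons_self)
      rw [this]

lemma padA_eq (row : List Int) (m : Int) :
    operPadA row m = row ++ List.replicate ((m - PySem.List.len row).toNat) 0 := by
  induction row using operPadA.induct (m := m) with
  | case1 row h ih =>
      rw [operPadA, dif_pos h, ih]
      simp only [PySem.List.len_eq] at *
      have h2 : ((m - (row.length : Int)).toNat) = ((m - ((row.length : Int) + 1)).toNat) + 1 := by
        omega
      rw [h2, List.append_assoc]
      congr 1
      rw [List.replicate_succ]
      simp only [List.singleton_append, List.length_append, List.length_cons,
        List.length_nil, List.cons.injEq, true_and]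
      norm_num
  | case2 row h =>
      rw [operPadA, dif_neg h]
      simp only [PySem.List.len_eq] at h ⊢
      have h0 : ((m - (row.length : Int)).toNat) = 0 := by omega
      rw [h0, List.replicate_zero, List.append_nil]

lemma fold_eq (arr : List (List Int)) (s : List (List Int) × Int) :
    arr.foldl (fun (s : List (List Int) × Int) row =>
      let counter := PySem.Dict.counter (row.filter (fun x => !(x == 0)))
      let pairs := PySem.List.sorted2 counter.items (fun p => p.2) (fun p => p.1)
      let newRow := pairs.foldl (fun acc (p : Int × Int) => acc ++ [p.1, p.2]) []
      let newRow := PySem.List.slice newRow none (some 100)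
      (s.1 ++ [newRow], max s.2 (PySem.List.len newRow))) s
    = (s.1 ++ arr.map pvRowA,
       (arr.map (fun r => PySem.List.len (pvRowA r))).foldl max s.2) := by
  induction arr generalizing s with
  | nil => simp
  | cons row t ih =>
      rw [List.foldl_cons, ih]
      simp [pvRowA]

theorem oper_eq_alt (arr : List (List Int)) : oper arr = oper_alt arr := by
  unfold oper oper_alt
  rw [fold_eq]
  simp only [List.nil_append]
  have hrows : arr.map operRowB = arr.map pvRowA := by
    exact List.map_congr_left (fun r _ => (row_eq r).symm)
  rw [hrows]
  have hmax : PySem.List.maxD ((arr.map pvRowA).map PySem.List.len) (fun x => x) 0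
      = (arr.map (fun r => PySem.List.len (pvRowA r))).foldl max 0 := by
    rw [List.map_map]
    refine maxD_nonneg_eq _ ?_
    intro x hx
    simp only [List.mem_map] at hx
    obtain ⟨r, _, rfl⟩ := hx
    simp [PySem.List.len_eq]
  rw [hmax]
  exact List.map_congr_left (fun r _ => padA_eq _ _)

-- ===== VERDICT (by name: the statement is the Claim_ definition above) =====
theorem oper_spec : Claim_equal_oper := by
  intro arr _
  unfold Spec_oper
  exact oper_eq_alt arr
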